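-- pv_equiv track=rewrite | github.com/VilliTodorova/softuni_python_courses | python_fundamentals/text_processing/character_multiplier.py | calculate_sum_of_multiplied_codes
-- ===== SOURCE A (Python) =====
-- def calculate_sum_of_multiplied_codes(str1, str2):
--     total_sum = 0
--
--     # Iterate through the characters of both strings
--     for char1, char2 in zip(str1, str2):
--         # Multiply character codes and add to the total sum
--         total_sum += ord(char1) * ord(char2)
--
--     # If one string is longer than the other, add remaining character codes
--     if len(str1) > len(str2):
--         total_sum += sum(ord(char) for char in str1[len(str2):])
--     elif len(str2) > len(str1):
--         total_sum += sum(ord(char) for char in str2[len(str1):])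
--
--     return total_sum
-- ===== SOURCE B (Python) =====
-- def calculate_sum_of_multiplied_codes(str1, str2):
--     # Algebraic identity: for the common prefix, a*b = (a-1)*(b-1) + a + b - 1.
--     # Summing over the prefix and adding the unpaired tail codes gives
--     #   result = sum((a-1)*(b-1)) + sum(all codes of str1) + sum(all codes of str2) - min(len1, len2)
--     # so no length comparison or tail slicing is needed at all.
--     shifted = sum((ord(a) - 1) * (ord(b) - 1) for a, b in zip(str1, str2))
--     return shifted + sum(map(ord, str1)) + sum(map(ord, str2)) - min(len(str1), len(str2))
-- ===== Notes on version B (the rewrite author's own statement) =====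
-- stated objective: alternative
-- what changed: Replaces the pairwise product loop plus len-comparison tail summation by an algebraic identity: sum of (ord(a)-1)*(ord(b)-1) over the zipped prefix plus the full code sums of both strings minus min(len1,len2), eliminating all tail/branch handling.
import Mathlib
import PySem

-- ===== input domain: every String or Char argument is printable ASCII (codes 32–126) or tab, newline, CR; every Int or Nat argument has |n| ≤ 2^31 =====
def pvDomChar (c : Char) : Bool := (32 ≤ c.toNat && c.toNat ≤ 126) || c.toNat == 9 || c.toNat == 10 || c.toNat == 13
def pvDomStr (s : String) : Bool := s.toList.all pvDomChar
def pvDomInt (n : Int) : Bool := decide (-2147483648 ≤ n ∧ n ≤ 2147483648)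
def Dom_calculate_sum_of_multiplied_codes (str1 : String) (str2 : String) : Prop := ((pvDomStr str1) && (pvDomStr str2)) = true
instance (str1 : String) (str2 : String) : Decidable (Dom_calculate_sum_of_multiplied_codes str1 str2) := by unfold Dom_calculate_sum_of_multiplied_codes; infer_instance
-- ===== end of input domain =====

-- B replaces A's product loop + len-comparison tail branches by the identity
-- Σ aᵢbᵢ + tails = Σ(aᵢ-1)(bᵢ-1) + Σord(str1) + Σord(str2) - min(len) (alternative; return value only).

-- ===== PORT A =====
def calculate_sum_of_multiplied_codes (str1 : String) (str2 : String) : Int :=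
  -- total_sum = 0; for char1, char2 in zip(str1, str2): total_sum += ord(char1)*ord(char2)
  let l1 := str1.toList
  let l2 := str2.toList
  let total_sum : Int :=
    (l1.zip l2).foldl (fun acc p => acc + (p.1.toNat : Int) * (p.2.toNat : Int)) 0
  -- if len(str1) > len(str2): total_sum += sum(ord(c) for c in str1[len(str2):]) ; elif symmetric
  if l1.length > l2.length then
    total_sum + ((PySem.List.slice l1 (some (l2.length : Int)) none).map (fun c => (c.toNat : Int))).sum
  else if l2.length > l1.length then
    total_sum + ((PySem.List.slice l2 (some (l1.length : Int)) none).map (fun c => (c.toNat : Int))).sum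
  else
    total_sum

-- ===== PORT B =====
def calculate_sum_of_multiplied_codes_alt (str1 : String) (str2 : String) : Int :=
  let l1 := str1.toList
  let l2 := str2.toList
  -- shifted = sum((ord(a)-1)*(ord(b)-1) for a, b in zip(str1, str2))
  let shifted : Int :=
    ((l1.zip l2).map (fun p => ((p.1.toNat : Int) - 1) * ((p.2.toNat : Int) - 1))).sum
  -- shifted + sum(map(ord, str1)) + sum(map(ord, str2)) - min(len(str1), len(str2))
  shifted + (l1.map (fun c => (c.toNat : Int))).sum + (l2.map (fun c => (c.toNat : Int))).sum
    - (min l1.length l2.length : Int)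

-- ===== PRECONDITION & SPEC =====
def Spec_calculate_sum_of_multiplied_codes (str1 : String) (str2 : String) (out : Int) : Prop := out = calculate_sum_of_multiplied_codes_alt str1 str2
instance (str1 : String) (str2 : String) (out : Int) : Decidable (Spec_calculate_sum_of_multiplied_codes str1 str2 out) := by unfold Spec_calculate_sum_of_multiplied_codes; infer_instance

-- ===== CLAIM (what is proved, stated in full; the proofs are below) =====
def Claim_equal_calculate_sum_of_multiplied_codes : Prop := ∀ (str1 : String) (str2 : String), Dom_calculate_sum_of_multiplied_codes str1 str2 → Spec_calculate_sum_of_multiplied_codes str1 str2 (calculate_sum_of_multiplied_codes str1 str2)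

-- ===== LEMMAS AND PROOFS =====

-- The shifted-product identity on the common prefix, together with both full tails.
lemma pv_identity (l1 l2 : List Char) :
    ((l1.zip l2).map (fun p => (p.1.toNat : Int) * (p.2.toNat : Int))).sum
      + ((l1.drop l2.length).map (fun c => (c.toNat : Int))).sum
      + ((l2.drop l1.length).map (fun c => (c.toNat : Int))).sum
    = ((l1.zip l2).map (fun p => ((p.1.toNat : Int) - 1) * ((p.2.toNat : Int) - 1))).sum
      + (l1.map (fun c => (c.toNat : Int))).sum + (l2.map (fun c => (c.toNat : Int))).sum
      - (min l1.length l2.length : Int) := by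
  induction l1 generalizing l2 with
  | nil => simp
  | cons a as ih =>
    cases l2 with
    | nil => simp; omega
    | cons b bs =>
      have h := ih bs
      simp only [List.zip_cons_cons, List.map_cons, List.sum_cons, List.length_cons,
        List.drop_succ_cons] at h ⊢
      have hm : min ((as.length + 1 : Nat) : Int) ((bs.length + 1 : Nat) : Int)
          = min (as.length : Int) (bs.length : Int) + 1 := by
        push_cast; omega
      have key : (a.toNat : Int) * (b.toNat : Int)
          = ((a.toNat : Int) - 1) * ((b.toNat : Int) - 1) + a.toNat + b.toNat - 1 := by ring
      rw [hm]; linarith [h, key]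

lemma pvA_eq (str1 str2 : String) :
    calculate_sum_of_multiplied_codes str1 str2 = calculate_sum_of_multiplied_codes_alt str1 str2 := by
  simp only [calculate_sum_of_multiplied_codes, calculate_sum_of_multiplied_codes_alt]
  rw [PySem.List.foldl_add, PySem.List.slice_from_natCast, PySem.List.slice_from_natCast]
  have h := pv_identity str1.toList str2.toList
  rcases lt_trichotomy str1.toList.length str2.toList.length with hlt | heq | hgt
  · rw [if_neg (by omega), if_pos hlt]
    rw [List.drop_eq_nil_of_le (le_of_lt hlt)] at h
    simp at h ⊢; omega
  · rw [if_neg (by omega), if_neg (by omega)]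
    rw [List.drop_eq_nil_of_le (le_of_eq heq), List.drop_eq_nil_of_le (le_of_eq heq.symm)] at h
    simp at h ⊢; omega
  · rw [if_pos hgt]
    rw [List.drop_eq_nil_of_le (le_of_lt hgt)] at h
    simp at h ⊢; omega

-- ===== VERDICT (by name: the statement is the Claim_ definition above) =====
theorem calculate_sum_of_multiplied_codes_spec : Claim_equal_calculate_sum_of_multiplied_codes := by
  intro str1 str2 _
  exact pvA_eq str1 str2
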